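-- pv_equiv track=rewrite | github.com/phamkimkhuong/auto_test_gen_python | core_engine/heuristics.py | _normalize_annotation
-- ===== SOURCE A (Python) =====
-- def _normalize_annotation(annotation: str) -> str:
--     text = (annotation or "Any").replace("typing.", "")
--     if text == "list" or text.startswith("List[") or text.startswith("list["):
--         return "list"
--     if text == "dict" or text.startswith("Dict[") or text.startswith("dict["):
--         return "dict"
--     if text.startswith("Optional["):
--         inner = text[len("Optional["):-1]
--         return _normalize_annotation(inner)
--     if "|" in text and "None" in text:
--         parts = [p.strip() for p in text.split("|") if p.strip() != "None"]
--         if len(parts) == 1: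
--             return _normalize_annotation(parts[0])
--     return text
-- ===== SOURCE B (Python) =====
-- _KINDS = (("list", ("List[", "list[")), ("dict", ("Dict[", "dict[")))
--
--
-- def _clean(text):
--     return (text or "Any").replace("typing.", "")
--
--
-- def _kind(text):
--     for name, prefixes in _KINDS:
--         if text == name or text.startswith(prefixes):
--             return name
--     return None
--
--
-- def _unwrap(text):
--     if text.startswith("Optional["):
--         return text[len("Optional["):-1]
--     if "|" in text and "None" in text:
--         parts = [p.strip() for p in text.split("|") if p.strip() != "None"]
--         if len(parts) == 1:
--             return parts[0]
--     return None
--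
--
-- def _normalize_annotation(annotation: str) -> str:
--     text = _clean(annotation)
--     while True:
--         k = _kind(text)
--         if k is not None:
--             return k
--         nxt = _unwrap(text)
--         if nxt is None:
--             return text
--         text = _clean(nxt)
-- ===== Notes on version B (the rewrite author's own statement) =====
-- stated objective: alternative
-- what changed: A's self-recursion with inline chained-if checks is replaced by an iterative driver loop built from three small helpers: a table-driven kind lookup over a prefix table (first match wins), an unwrap step returning the next inner text or None, and a clean step re-applied per iteration.
import Mathlib
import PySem

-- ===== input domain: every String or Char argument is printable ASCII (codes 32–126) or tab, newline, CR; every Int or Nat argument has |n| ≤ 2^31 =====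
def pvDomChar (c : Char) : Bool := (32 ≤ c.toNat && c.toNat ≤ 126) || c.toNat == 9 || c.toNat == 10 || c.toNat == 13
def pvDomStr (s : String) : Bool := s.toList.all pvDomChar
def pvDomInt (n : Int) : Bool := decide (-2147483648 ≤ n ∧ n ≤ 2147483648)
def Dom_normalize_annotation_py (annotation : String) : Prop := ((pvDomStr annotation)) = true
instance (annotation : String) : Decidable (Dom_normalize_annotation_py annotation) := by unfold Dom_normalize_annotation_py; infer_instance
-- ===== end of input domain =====

-- B replaces A's self-recursion and inline chained-ifs by an iterative driver over three
-- helpers (table-driven kind lookup, Option-valued unwrap step, per-iteration clean);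
-- objective: alternative decomposition, same cost.

-- ===== PORT A =====
-- A is structurally recursive; the Nat fuel only makes the same computation total
-- (each recursive call's argument is strictly shorter, so `length + 1` fuel is never exhausted).
def pvNormA : Nat → String → String
  | 0, annotation =>
      PySem.Str.replace (if annotation == "" then "Any" else annotation) "typing." ""
  | Nat.succ fuel, annotation =>
      let text := PySem.Str.replace (if annotation == "" then "Any" else annotation) "typing." ""
      if text == "list" || PySem.Str.startswith text "List[" || PySem.Str.startswith text "list[" then
        "list"
      else if text == "dict" || PySem.Str.startswith text "Dict[" || PySem.Str.startswith text "dict[" then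
        "dict"
      else if PySem.Str.startswith text "Optional[" then
        let inner := PySem.Str.slice text (some 9) (some (-1))
        pvNormA fuel inner
      else if PySem.Str.isIn "|" text && PySem.Str.isIn "None" text then
        let parts := (((PySem.Str.split? text "|").getD []).map PySem.Str.strip).filter
          (fun p => p != "None")
        match parts with
        | [p] => pvNormA fuel p
        | _ => text
      else
        text

def normalize_annotation_py (annotation : String) : String :=
  pvNormA (annotation.toList.length + 1) annotation

-- ===== PORT B =====
-- `_clean`: `(text or "Any").replace("typing.", "")`
def pvClean (s : String) : String :=
  PySem.Str.replace (if s == "" then "Any" else s) "typing." ""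

-- `_KINDS`: the prefix table the kind lookup iterates over
def pvKinds : List (String × List String) :=
  [("list", ["List[", "list["]), ("dict", ["Dict[", "dict["])]

-- `_kind`: first matching table row wins (findSome? = Python's for-loop with early return)
def pvKind (text : String) : Option String :=
  pvKinds.findSome? (fun kp =>
    if text == kp.1 || kp.2.any (fun p => PySem.Str.startswith text p) then some kp.1 else none)

-- `_unwrap`: the next inner text, or none when normalization is finished
def pvUnwrap (text : String) : Option String :=
  if PySem.Str.startswith text "Optional[" then
    some (PySem.Str.slice text (some 9) (some (-1)))
  else if PySem.Str.isIn "|" text && PySem.Str.isIn "None" text then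
    match (((PySem.Str.split? text "|").getD []).map PySem.Str.strip).filter
        (fun p => p != "None") with
    | [p] => some p
    | _ => none
  else
    none

-- the while-True driver of B (fuel only makes the same loop total)
def pvDrive : Nat → String → String
  | 0, text => text
  | Nat.succ fuel, text =>
      match pvKind text with
      | some k => k
      | none =>
          match pvUnwrap text with
          | some nxt => pvDrive fuel (pvClean nxt)
          | none => text

def normalize_annotation_py_alt (annotation : String) : String :=
  pvDrive (annotation.toList.length + 1) (pvClean annotation)

-- ===== PRECONDITION & SPEC =====
def Spec_normalize_annotation_py (annotation : String) (out : String) : Prop := out = normalize_annotation_py_alt annotation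
instance (annotation : String) (out : String) : Decidable (Spec_normalize_annotation_py annotation out) := by unfold Spec_normalize_annotation_py; infer_instance

-- ===== CLAIM (what is proved, stated in full; the proofs are below) =====
def Claim_equal_normalize_annotation_py : Prop := ∀ (annotation : String), Dom_normalize_annotation_py annotation → Spec_normalize_annotation_py annotation (normalize_annotation_py annotation)

-- ===== LEMMAS AND PROOFS =====

-- A's recursion and B's driver loop run the same steps: with equal fuel they agree
theorem pvNormA_eq_drive (fuel : Nat) (annotation : String) :
    pvNormA fuel annotation = pvDrive fuel (pvClean annotation) := by
  induction fuel generalizing annotation with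
  | zero => rfl
  | succ fuel ih =>
      show pvNormA (fuel + 1) annotation = pvDrive (fuel + 1) (pvClean annotation)
      rw [pvNormA, pvDrive, pvClean]
      simp only [pvKind, pvKinds, pvUnwrap, List.findSome?]
      generalize (PySem.Str.replace (if annotation == "" then "Any" else annotation) "typing." "") = t
      simp only [List.any_cons, List.any_nil, Bool.or_false, Bool.or_assoc]
      split_ifs <;> try rfl
      · exact ih _
      · rcases hp : (((PySem.Str.split? t "|").getD []).map PySem.Str.strip).filter
            (fun p => p != "None") with _ | ⟨p, _ | ⟨q, l⟩⟩ <;>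
          first | exact ih _ | rfl

-- ===== VERDICT (by name: the statement is the Claim_ definition above) =====
theorem normalize_annotation_py_spec : Claim_equal_normalize_annotation_py := by
  intro annotation _
  unfold Spec_normalize_annotation_py normalize_annotation_py normalize_annotation_py_alt
  exact pvNormA_eq_drive _ _
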